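-- pv_equiv track=rewrite | github.com/Doudna-lab/team_resources | toolbox/hisat3n_tools/py/process_maxconv.py | clean_aligned_pairs
-- ===== SOURCE A (Python) =====
-- def clean_aligned_pairs(aligned_pairs):
-- 	parsed_pairs = []
-- 	ref_aln_lookup = []
--
-- 	for query_aln_column, ref_aln_column in aligned_pairs:
-- 		# == Skip Aligned Pairs with gaps
-- 		if ref_aln_column is None or query_aln_column is None:
-- 			continue
-- 		ref_aln_lookup.append(int(ref_aln_column))
-- 		parsed_pairs.append((int(query_aln_column), int(ref_aln_column)))
-- 	return min(ref_aln_lookup), max(ref_aln_lookup), parsed_pairs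
-- ===== SOURCE B (Python) =====
-- def clean_aligned_pairs(aligned_pairs):
--     parsed_pairs = [(int(q), int(r)) for q, r in aligned_pairs
--                     if q is not None and r is not None]
--     refs_sorted = sorted(r for _, r in parsed_pairs)
--     return refs_sorted[0], refs_sorted[-1], parsed_pairs
-- ===== Notes on version B (the rewrite author's own statement) =====
-- stated objective: alternative
-- what changed: Replaces A's imperative append-loop plus two min/max scans by a declarative comprehension that filters the gapless pairs and a single sort of the ref columns, reading the extrema off the sorted list's first and last elements.
import Mathlib
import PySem

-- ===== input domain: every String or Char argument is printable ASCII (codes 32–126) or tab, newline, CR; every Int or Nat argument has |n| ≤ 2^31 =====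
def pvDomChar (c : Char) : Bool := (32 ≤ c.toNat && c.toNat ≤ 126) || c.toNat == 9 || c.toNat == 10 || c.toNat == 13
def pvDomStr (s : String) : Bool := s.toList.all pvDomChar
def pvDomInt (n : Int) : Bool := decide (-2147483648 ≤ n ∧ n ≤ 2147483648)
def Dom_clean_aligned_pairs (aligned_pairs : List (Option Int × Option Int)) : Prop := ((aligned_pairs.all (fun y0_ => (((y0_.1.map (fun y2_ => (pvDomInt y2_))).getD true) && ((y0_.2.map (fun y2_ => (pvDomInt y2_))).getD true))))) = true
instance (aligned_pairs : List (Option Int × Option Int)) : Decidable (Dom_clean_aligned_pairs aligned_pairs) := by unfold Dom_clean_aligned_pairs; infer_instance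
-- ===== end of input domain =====

-- B replaces A's append-loop plus min/max scans by a filtering comprehension and one sort of the
-- ref columns, reading the extrema off the sorted list's ends (objective: alternative).
-- A raises ValueError (min of an empty list) when no gapless pair exists; B raises IndexError
-- there; Pre_ excludes exactly those inputs.

-- ===== PORT A =====
-- loop body of A: two growing lists (parsed_pairs, ref_aln_lookup)
def cleanGoA : List (Option Int × Option Int) → List (Int × Int) → List Int → List (Int × Int) × List Int
  | [], parsed, lookup => (parsed, lookup)
  | (q, r) :: t, parsed, lookup =>
    match q, r with
    | some qv, some rv => cleanGoA t (parsed ++ [(qv, rv)]) (lookup ++ [rv])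
    | _, _ => cleanGoA t parsed lookup

def clean_aligned_pairs (aligned_pairs : List (Option Int × Option Int)) : Int × Int × (List (Int × Int)) :=
  let s := cleanGoA aligned_pairs [] []
  -- min([])/max([]) raise in Python: none there, excluded by Pre_; getD 0 is an arbitrary total default
  ((PySem.List.min? s.2 (fun y => y)).getD 0, (PySem.List.max? s.2 (fun y => y)).getD 0, s.1)

-- ===== PORT B =====
-- Source B's comprehension: the gapless pairs
def cleanParsed (xs : List (Option Int × Option Int)) : List (Int × Int) :=
  xs.filterMap (fun p => match p.1, p.2 with | some q, some r => some (q, r) | _, _ => none)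

def clean_aligned_pairs_alt (aligned_pairs : List (Option Int × Option Int)) : Int × Int × (List (Int × Int)) :=
  let parsed_pairs := cleanParsed aligned_pairs
  let refs_sorted := PySem.List.sorted (parsed_pairs.map Prod.snd) (fun x => x) false
  -- refs_sorted[0] / refs_sorted[-1]: none on [] (IndexError, excluded by Pre_); getD 0 arbitrary
  ((PySem.List.pyGet? refs_sorted 0).getD 0, (PySem.List.pyGet? refs_sorted (-1)).getD 0, parsed_pairs)

-- ===== PRECONDITION & SPEC =====
-- Pre_ excludes the inputs with no gapless pair, where Python A raises ValueError (min of an empty list).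
def Pre_clean_aligned_pairs (aligned_pairs : List (Option Int × Option Int)) : Prop :=
  (aligned_pairs.any (fun p => p.1.isSome && p.2.isSome)) = true
instance (aligned_pairs : List (Option Int × Option Int)) : Decidable (Pre_clean_aligned_pairs aligned_pairs) := by unfold Pre_clean_aligned_pairs; infer_instance
def pvWitness_clean_aligned_pairs : (List (Option Int × Option Int)) := [(some 3, some 7)]

def Spec_clean_aligned_pairs (aligned_pairs : List (Option Int × Option Int)) (out : Int × Int × (List (Int × Int))) : Prop := out = clean_aligned_pairs_alt aligned_pairs
instance (aligned_pairs : List (Option Int × Option Int)) (out : Int × Int × (List (Int × Int))) : Decidable (Spec_clean_aligned_pairs aligned_pairs out) := by unfold Spec_clean_aligned_pairs; infer_instance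

-- ===== CLAIM =====
def Claim_equal_clean_aligned_pairs : Prop := ∀ (aligned_pairs : List (Option Int × Option Int)), Dom_clean_aligned_pairs aligned_pairs → Pre_clean_aligned_pairs aligned_pairs → Spec_clean_aligned_pairs aligned_pairs (clean_aligned_pairs aligned_pairs)

-- ===== LEMMAS AND PROOFS =====

def cleanRefs (xs : List (Option Int × Option Int)) : List Int := (cleanParsed xs).map Prod.snd

lemma cleanGoA_eq (xs : List (Option Int × Option Int)) :
    ∀ p l, cleanGoA xs p l = (p ++ cleanParsed xs, l ++ cleanRefs xs) := by
  induction xs with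
  | nil => intro p l; simp [cleanGoA, cleanParsed, cleanRefs]
  | cons h t ih =>
    intro p l
    obtain ⟨q, r⟩ := h
    match q, r with
    | some qv, some rv => simp [cleanGoA, cleanParsed, cleanRefs, ih]
    | none, _ => simp [cleanGoA, cleanParsed, cleanRefs, ih]
    | some _, none => simp [cleanGoA, cleanParsed, cleanRefs, ih]

lemma cleanRefs_ne_nil {xs : List (Option Int × Option Int)}
    (h : Pre_clean_aligned_pairs xs) : cleanRefs xs ≠ [] := by
  unfold Pre_clean_aligned_pairs at h
  rw [List.any_eq_true] at h
  obtain ⟨⟨q, r⟩, hmem, hp⟩ := h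
  simp only [Bool.and_eq_true, Option.isSome_iff_exists] at hp
  obtain ⟨⟨qv, hq⟩, rv, hr⟩ := hp
  subst hq hr
  intro hnil
  have : (rv : Int) ∈ cleanRefs xs := by
    unfold cleanRefs cleanParsed
    simp only [List.mem_map, List.mem_filterMap]
    exact ⟨(qv, rv), ⟨⟨some qv, some rv⟩, hmem, rfl⟩, rfl⟩
  rw [hnil] at this
  exact absurd this (List.not_mem_nil)

lemma le_getLast_of_pairwise {l : List Int} (hp : l.Pairwise (· ≤ ·)) (h : l ≠ []) :
    ∀ y ∈ l, y ≤ l.getLast h := by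
  induction l with
  | nil => exact absurd rfl h
  | cons a t ih =>
    intro y hy
    cases t with
    | nil => simp at hy; simp [hy]
    | cons b u =>
      rw [List.getLast_cons (by simp)]
      rcases List.mem_cons.mp hy with hya | hyt
      · subst hya
        have hlast : (b :: u).getLast (by simp) ∈ b :: u := List.getLast_mem _
        exact (List.pairwise_cons.mp hp).1 _ hlast
      · exact ih (List.pairwise_cons.mp hp).2 (by simp) y hyt

-- min over a nonempty list = head of the sorted list
lemma min_eq_sorted_head (rs : List Int) (h : rs ≠ []) :
    (PySem.List.min? rs (fun y => y)).getD 0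
      = (PySem.List.pyGet? (PySem.List.sorted rs (fun x => x) false) 0).getD 0 := by
  obtain ⟨mn, hmn⟩ : ∃ mn, PySem.List.min? rs (fun y => y) = some mn := by
    cases hm : PySem.List.min? rs (fun y => y) with
    | none => exact absurd ((PySem.List.min?_eq_none_iff _ _).mp hm) h
    | some m => exact ⟨m, rfl⟩
  cases hs : PySem.List.sorted rs (fun x => x) false with
  | nil => exact absurd ((PySem.List.sorted_eq_nil_iff _ _ _).mp hs) h
  | cons m t =>
    have hmem_m : m ∈ rs := (PySem.List.mem_sorted _ _ _ _).mp (by rw [hs]; simp)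
    have h1 : mn ≤ m := PySem.List.min?_isMin hmn m hmem_m
    have h2 : m ≤ mn := PySem.List.key_head_sorted_le rs (fun x => x) hs mn (PySem.List.min?_mem hmn)
    simp [hmn, le_antisymm h1 h2]

-- max over a nonempty list = last of the sorted list
lemma max_eq_sorted_last (rs : List Int) (h : rs ≠ []) :
    (PySem.List.max? rs (fun y => y)).getD 0
      = (PySem.List.pyGet? (PySem.List.sorted rs (fun x => x) false) (-1)).getD 0 := by
  obtain ⟨mx, hmx⟩ : ∃ mx, PySem.List.max? rs (fun y => y) = some mx := by
    cases hm : PySem.List.max? rs (fun y => y) with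
    | none => exact absurd ((PySem.List.max?_eq_none_iff _ _).mp hm) h
    | some m => exact ⟨m, rfl⟩
  have hsne : PySem.List.sorted rs (fun x => x) false ≠ [] := by
    intro hnil; exact h ((PySem.List.sorted_eq_nil_iff _ _ _).mp hnil)
  have hlast_mem : (PySem.List.sorted rs (fun x => x) false).getLast hsne ∈ rs :=
    (PySem.List.mem_sorted _ _ _ _).mp (List.getLast_mem hsne)
  have hmx_mem : mx ∈ PySem.List.sorted rs (fun x => x) false :=
    (PySem.List.mem_sorted _ _ _ _).mpr (PySem.List.max?_mem hmx)
  have hpw : (PySem.List.sorted rs (fun x => x) false).Pairwise (· ≤ ·) := by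
    have := PySem.List.sorted_pairwise (xs := rs) (key := fun x => x)
    simpa using this
  have h1 : mx ≤ (PySem.List.sorted rs (fun x => x) false).getLast hsne :=
    le_getLast_of_pairwise hpw hsne mx hmx_mem
  have h2 : (PySem.List.sorted rs (fun x => x) false).getLast hsne ≤ mx :=
    PySem.List.max?_isMax hmx _ hlast_mem
  rw [PySem.List.pyGet?_neg_one, List.getLast?_eq_some_getLast hsne]
  simp [hmx, le_antisymm h1 h2]

-- ===== VERDICT =====
theorem clean_aligned_pairs_spec : Claim_equal_clean_aligned_pairs := by
  intro xs _ hpre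
  unfold Spec_clean_aligned_pairs clean_aligned_pairs clean_aligned_pairs_alt
  rw [cleanGoA_eq]
  have hne := cleanRefs_ne_nil hpre
  simp only [List.nil_append]
  rw [min_eq_sorted_head _ hne, max_eq_sorted_last _ hne]
  rfl
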